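-- pv_equiv track=rewrite | github.com/opentargets/evidence_datasource_parsers | src/modules/baseline_expression/metrics.py | hpa_distribution
-- ===== SOURCE A (Python) =====
-- def hpa_distribution(row, low_expression_threshold):
--     """HPA distribution metric. See: https://www.proteinatlas.org/about/assays+annotation#classification_rna."""
--     expr = sorted(row)
--     if expr[-1] < low_expression_threshold:
--         return "Not detected"
--     num_detected = sum([e > low_expression_threshold for e in expr])
--     if num_detected == 1:
--         return "Detected in single"
--     if num_detected < len(row) / 3:
--         return "Detected in some"
--     if num_detected < len(row):
--         return "Detected in many"
--     return "Detected in all"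
-- ===== SOURCE B (Python) =====
-- def hpa_distribution(row, low_expression_threshold):
--     """One pass, no sort: track the running maximum and the count above the
--     threshold together, then classify with integer arithmetic (3*cnt < n
--     instead of the float division cnt < n/3)."""
--     mx = row[0]
--     cnt = 0
--     for e in row:
--         if e > mx:
--             mx = e
--         if e > low_expression_threshold:
--             cnt += 1
--     if mx < low_expression_threshold:
--         return "Not detected"
--     n = len(row)
--     if cnt == 1:
--         return "Detected in single"
--     if 3 * cnt < n:
--         return "Detected in some"
--     if cnt < n:
--         return "Detected in many"
--     return "Detected in all"
-- ===== Notes on version B (the rewrite author's own statement) =====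
-- stated objective: faster
-- what changed: Replaces sort-then-scan (sorted(row), expr[-1], then a separate sum over the sorted copy) by a single fused pass that tracks the running maximum and the above-threshold count together, and replaces the float comparison cnt < n/3 by integer arithmetic 3*cnt < n.
import Mathlib
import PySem

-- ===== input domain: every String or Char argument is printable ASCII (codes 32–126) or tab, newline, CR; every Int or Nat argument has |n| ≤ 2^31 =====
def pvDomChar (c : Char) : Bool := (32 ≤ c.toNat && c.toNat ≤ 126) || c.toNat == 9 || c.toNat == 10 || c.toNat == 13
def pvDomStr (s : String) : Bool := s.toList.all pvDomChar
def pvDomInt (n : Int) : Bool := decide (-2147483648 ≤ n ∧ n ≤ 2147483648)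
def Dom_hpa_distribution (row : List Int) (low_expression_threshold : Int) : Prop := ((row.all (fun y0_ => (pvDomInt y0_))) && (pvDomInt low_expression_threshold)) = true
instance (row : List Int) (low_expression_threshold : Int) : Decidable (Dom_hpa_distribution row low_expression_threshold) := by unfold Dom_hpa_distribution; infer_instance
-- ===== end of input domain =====

-- B fuses A's sort-then-max and separate count into one pass (running max + count) with integer arithmetic replacing the float division; equivalence proved for nonempty rows (A and B both raise on []).


-- ===== PORT A =====
-- expr = sorted(row); expr[-1] → PySem.List.pyGet? expr (-1) (none = IndexError, excluded by Pre_).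
-- The float comparison num_detected < len(row)/3 is rendered as the exact rational comparison
-- 3*num_detected < len(row): exact on the domain (|len(row)| ≤ 2^31 < 2^53, so the rounding of
-- len(row)/3 never crosses an integer).
def hpa_distribution (row : List Int) (low_expression_threshold : Int) : String :=
  let expr := PySem.List.sorted row (fun x => x) false
  match PySem.List.pyGet? expr (-1) with
  | none => ""  -- IndexError on empty row; excluded by Pre_
  | some last =>
    if last < low_expression_threshold then "Not detected"
    else
      let num_detected : Int := (expr.map (fun e => if e > low_expression_threshold then (1:Int) else 0)).sum
      if num_detected == 1 then "Detected in single"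
      else if 3 * num_detected < (row.length : Int) then "Detected in some"
      else if num_detected < (row.length : Int) then "Detected in many"
      else "Detected in all"

-- ===== PORT B =====
def hpa_distribution_alt (row : List Int) (low_expression_threshold : Int) : String :=
  match row with
  | [] => ""  -- row[0] IndexError; excluded by Pre_
  | h :: _ =>
    let p := row.foldl
      (fun (p : Int × Int) e =>
        (if e > p.1 then e else p.1, if e > low_expression_threshold then p.2 + 1 else p.2))
      (h, 0)
    if p.1 < low_expression_threshold then "Not detected"
    else if p.2 == 1 then "Detected in single"
    else if 3 * p.2 < (row.length : Int) then "Detected in some"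
    else if p.2 < (row.length : Int) then "Detected in many"
    else "Detected in all"

-- ===== PRECONDITION & SPEC =====
-- A raises IndexError on the empty row (expr[-1]); B raises there too (row[0]).
def Pre_hpa_distribution (row : List Int) (low_expression_threshold : Int) : Prop := row ≠ []
instance (row : List Int) (low_expression_threshold : Int) : Decidable (Pre_hpa_distribution row low_expression_threshold) := by unfold Pre_hpa_distribution; infer_instance
def pvWitness_hpa_distribution : List Int × Int := ([1, 2, 3], 1)

def Spec_hpa_distribution (row : List Int) (low_expression_threshold : Int) (out : String) : Prop := out = hpa_distribution_alt row low_expression_threshold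
instance (row : List Int) (low_expression_threshold : Int) (out : String) : Decidable (Spec_hpa_distribution row low_expression_threshold out) := by unfold Spec_hpa_distribution; infer_instance

-- ===== CLAIM (what is proved, stated in full; the proofs are below) =====
def Claim_equal_hpa_distribution : Prop := ∀ (row : List Int) (low_expression_threshold : Int), Dom_hpa_distribution row low_expression_threshold → Pre_hpa_distribution row low_expression_threshold → Spec_hpa_distribution row low_expression_threshold (hpa_distribution row low_expression_threshold)

-- ===== LEMMAS AND PROOFS =====

-- B's fused fold = (running max, count), the instance the verdict proof rewrites with
def maxStep (m e : Int) : Int := if e > m then e else m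

theorem foldl_pair (low : Int) (l : List Int) (a c : Int) :
    l.foldl (fun (p : Int × Int) e =>
        (if e > p.1 then e else p.1, if e > low then p.2 + 1 else p.2)) (a, c)
      = (l.foldl maxStep a, l.foldl (fun c e => if e > low then c + 1 else c) c) := by
  induction l generalizing a c with
  | nil => rfl
  | cons x xs ih =>
    simp only [List.foldl_cons]
    exact ih (maxStep a x) (if x > low then c + 1 else c)

-- the counting fold equals the sum of the 0/1 map
theorem foldl_count_eq_sum (t : Int) (l : List Int) (c : Int) :
    l.foldl (fun c e => if e > t then c + 1 else c) c
      = c + (l.map (fun e => if e > t then (1:Int) else 0)).sum := by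
  induction l generalizing c with
  | nil => simp
  | cons x xs ih =>
    simp only [List.foldl_cons, List.map_cons, List.sum_cons, ih]
    split <;> ring

theorem le_foldl_max (l : List Int) (a : Int) : a ≤ l.foldl maxStep a := by
  induction l generalizing a with
  | nil => simp
  | cons x xs ih =>
    refine le_trans ?_ (ih (maxStep a x))
    simp only [maxStep]; split <;> omega

theorem mem_le_foldl_max (l : List Int) (a : Int) : ∀ x ∈ l, x ≤ l.foldl maxStep a := by
  induction l generalizing a with
  | nil => simp
  | cons y ys ih =>
    intro x hx
    rcases List.mem_cons.1 hx with h | h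
    · subst h
      refine le_trans ?_ (le_foldl_max ys (maxStep a x))
      simp only [maxStep]; split <;> omega
    · exact ih (maxStep a y) x h

theorem foldl_max_mem (l : List Int) (a : Int) : l.foldl maxStep a = a ∨ l.foldl maxStep a ∈ l := by
  induction l generalizing a with
  | nil => simp
  | cons y ys ih =>
    rcases ih (maxStep a y) with h | h
    · rw [List.foldl_cons, h]
      by_cases hya : y > a
      · right; simp [maxStep, hya]
      · left; simp [maxStep, hya]
    · right; rw [List.foldl_cons]; exact List.mem_cons_of_mem _ h

-- the last element of a ≤-sorted list bounds every member
theorem mem_le_getLast (l : List Int) (hl : l ≠ []) (hp : l.Pairwise (· ≤ ·)) :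
    ∀ x ∈ l, x ≤ l.getLast hl := by
  induction l with
  | nil => simp at hl
  | cons y ys ih =>
    intro x hx
    rcases List.mem_cons.1 hx with h | h
    · subst h
      cases ys with
      | nil => simp [List.getLast]
      | cons z zs =>
        rw [List.getLast_cons (by simp)]
        exact le_trans (List.rel_of_pairwise_cons hp (List.getLast_mem _))
          (le_refl _)
    · cases ys with
      | nil => simp at h
      | cons z zs =>
        rw [List.getLast_cons (by simp)]
        exact ih (by simp) (List.Pairwise.of_cons hp) x h

-- A's sorted-last equals B's running maximum
theorem last_sorted_eq_foldl_max (h : Int) (t : List Int) :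
    ∀ hne, (PySem.List.sorted (h :: t) (fun x => x) false).getLast hne
      = (h :: t).foldl maxStep h := by
  intro hne
  have hperm : (PySem.List.sorted (h :: t) (fun x => x) false).Perm (h :: t) :=
    PySem.List.sorted_perm _ _ _
  have hpw : (PySem.List.sorted (h :: t) (fun x => x) false).Pairwise (· ≤ ·) := by
    simpa using PySem.List.sorted_pairwise (xs := h :: t) (key := fun x => x)
  have hMmem : (h :: t).foldl maxStep h ∈ (h :: t) := by
    rcases foldl_max_mem (h :: t) h with h' | h'
    · rw [h']; exact List.mem_cons_self
    · exact h'
  exact Int.le_antisymm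
    (mem_le_foldl_max (h :: t) h _ (hperm.mem_iff.1 (List.getLast_mem hne)))
    (mem_le_getLast _ hne hpw _ (hperm.mem_iff.2 hMmem))

-- A's count over the sorted copy equals the count over row
theorem sum_map_sorted (row : List Int) (t : Int) :
    ((PySem.List.sorted row (fun x => x) false).map (fun e => if e > t then (1:Int) else 0)).sum
      = (row.map (fun e => if e > t then (1:Int) else 0)).sum :=
  ((PySem.List.sorted_perm _ _ _).map _).sum_eq

-- ===== VERDICT (by name: the statement is the Claim_ definition above) =====
theorem hpa_distribution_spec : Claim_equal_hpa_distribution := by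
  intro row low hdom hpre
  unfold Spec_hpa_distribution hpa_distribution hpa_distribution_alt
  cases row with
  | nil => exact absurd rfl hpre
  | cons h t =>
    have hsne : PySem.List.sorted (h :: t) (fun x => x) false ≠ [] := by
      rw [Ne, PySem.List.sorted_eq_nil_iff]; simp
    dsimp only
    rw [PySem.List.pyGet?_neg_one, List.getLast?_eq_some_getLast hsne]
    rw [foldl_pair low (h :: t) h 0]
    have hmax : (PySem.List.sorted (h :: t) (fun x => x) false).getLast hsne
        = (h :: t).foldl maxStep h := last_sorted_eq_foldl_max h t hsne
    have hcnt : (h :: t).foldl (fun c e => if e > low then c + 1 else c) (0:Int)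
        = ((PySem.List.sorted (h :: t) (fun x => x) false).map
            (fun e => if e > low then (1:Int) else 0)).sum := by
      rw [foldl_count_eq_sum, sum_map_sorted]; ring
    rw [hmax, ← hcnt]
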